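-- pv_equiv track=rewrite | github.com/ooeunz/sopt25-ct-py | week_3/강민구/5397_keyLoger.py | findPassword
-- ===== SOURCE A (Python) =====
-- def findPassword(a) :
--     password_List = [] # 패스워드를 넣는 리스트
--     sub_List =[] # 문자를 잠시 보관하는 스택
--
--     for word in a :
--         if word == "<" : # sub_List에 맨 끝 단어 저장
--             if not password_List :
--                 continue
--             else :
--                 sub_List.append(password_List.pop())
--
--         elif word == ">" : # sub_list에서 pop 하여 다시 패스워드 리스트에 저장
--             if not sub_List :
--                 continue
--             else :
--                 password_List.append(sub_List.pop())
--
--         elif word =="-" : # 단어 삭제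
--             if not password_List :
--                 continue
--             else :
--                 password_List.pop()
--
--         else :
--             password_List.append(word)
--
--     #남아있는 sub_list 원소를 전부 pop
--     for _ in range(len(sub_List)) :
--         password_List.append(sub_List.pop())
--
--     return password_List
-- ===== SOURCE B (Python) =====
-- def findPassword(a):
--     password = []
--     cursor = 0
--     for word in a:
--         if word == "<":
--             if cursor > 0:
--                 cursor -= 1
--         elif word == ">":
--             if cursor < len(password):
--                 cursor += 1
--         elif word == "-":
--             if cursor > 0:
--                 password.pop(cursor - 1)
--                 cursor -= 1
--         else:
--             password.insert(cursor, word)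
--             cursor += 1
--     return password
-- ===== Notes on version B (the rewrite author's own statement) =====
-- stated objective: simpler
-- what changed: Replaces the two-stack representation (left stack + temporarily-popped right stack with a final drain loop) by a single list with an integer cursor, editing in place via insert/pop at the cursor, so no second stack and no flush pass exist.
import Mathlib
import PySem

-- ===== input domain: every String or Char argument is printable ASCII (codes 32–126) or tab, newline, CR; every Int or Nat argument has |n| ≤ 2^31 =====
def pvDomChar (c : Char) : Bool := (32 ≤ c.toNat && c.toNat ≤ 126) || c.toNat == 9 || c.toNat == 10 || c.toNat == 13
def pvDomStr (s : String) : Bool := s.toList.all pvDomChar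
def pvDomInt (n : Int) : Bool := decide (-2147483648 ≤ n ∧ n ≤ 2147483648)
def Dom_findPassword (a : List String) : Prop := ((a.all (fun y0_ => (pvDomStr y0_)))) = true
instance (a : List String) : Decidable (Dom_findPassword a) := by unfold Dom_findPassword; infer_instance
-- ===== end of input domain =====

-- B replaces A's two stacks + final drain loop by a single list with a cursor index (simpler; same return value).

-- ===== PORT A =====
-- one keystroke of A's loop over (password_List, sub_List)
def stepA (st : List String × List String) (word : String) : List String × List String :=
  if word = "<" then
    if h : st.1 = [] then st
    else (st.1.dropLast, st.2 ++ [st.1.getLast h])      -- sub_List.append(password_List.pop())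
  else if word = ">" then
    if h : st.2 = [] then st
    else (st.1 ++ [st.2.getLast h], st.2.dropLast)      -- password_List.append(sub_List.pop())
  else if word = "-" then
    if st.1 = [] then st
    else (st.1.dropLast, st.2)                          -- password_List.pop()
  else (st.1 ++ [word], st.2)                           -- password_List.append(word)

-- the final flush: for _ in range(len(sub_List)): password_List.append(sub_List.pop())
def flushA (L S : List String) : List String :=
  if h : S = [] then L
  else flushA (L ++ [S.getLast h]) S.dropLast
termination_by S.length
decreasing_by simp [List.length_dropLast]; exact List.length_pos_of_ne_nil h

def findPassword (a : List String) : List String :=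
  let st := a.foldl stepA ([], [])
  flushA st.1 st.2

-- ===== PORT B =====
-- one keystroke of B's loop over (password, cursor); insert/pop(i) ported by hand via take/drop (exact: cursor is always in range)
def stepB (st : List String × Nat) (word : String) : List String × Nat :=
  if word = "<" then
    (st.1, if st.2 > 0 then st.2 - 1 else st.2)
  else if word = ">" then
    (st.1, if st.2 < st.1.length then st.2 + 1 else st.2)
  else if word = "-" then
    if st.2 > 0 then (st.1.eraseIdx (st.2 - 1), st.2 - 1) else st
  else (st.1.take st.2 ++ word :: st.1.drop st.2, st.2 + 1)

def findPassword_alt (a : List String) : List String :=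
  (a.foldl stepB ([], 0)).1

-- ===== PRECONDITION & SPEC =====
def Spec_findPassword (a : List String) (out : List String) : Prop := out = findPassword_alt a
instance (a : List String) (out : List String) : Decidable (Spec_findPassword a out) := by unfold Spec_findPassword; infer_instance

-- ===== CLAIM (what is proved, stated in full; the proofs are below) =====
def Claim_equal_findPassword : Prop := ∀ (a : List String), Dom_findPassword a → Spec_findPassword a (findPassword a)

-- ===== LEMMAS AND PROOFS =====

theorem flushA_eq (S : List String) : ∀ L, flushA L S = L ++ S.reverse := by
  induction S using List.reverseRecOn with
  | nil => intro L; simp [flushA]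
  | append_singleton S' x ih =>
      intro L
      rw [flushA]
      simp [ih]

-- relation between the two loop states: B's list is L ++ S.reverse, B's cursor is L.length
theorem stepAB (L S : List String) (w : String) :
    stepB (L ++ S.reverse, L.length) w
      = ((stepA (L, S) w).1 ++ (stepA (L, S) w).2.reverse, (stepA (L, S) w).1.length) := by
  unfold stepA stepB
  by_cases h1 : w = "<"
  · subst h1
    by_cases h : L = []
    · simp [h]
    · have hpos := List.length_pos_of_ne_nil h
      have hL := List.dropLast_append_getLast h
      simp only [String.reduceEq, reduceIte, dif_neg h, if_pos hpos, Prod.mk.injEq]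
      refine ⟨?_, by simp [List.length_dropLast]⟩
      rw [List.reverse_append, ← List.append_assoc]
      simp [hL]
  · by_cases h2 : w = ">"
    · subst h2
      by_cases h : S = []
      · simp [h1, h]
      · have hlt : L.length < (L ++ S.reverse).length := by
          have := List.length_pos_of_ne_nil h
          simp only [List.length_append, List.length_reverse]; omega
        have hS := List.dropLast_append_getLast h
        simp only [String.reduceEq, reduceIte, dif_neg h, if_pos hlt, Prod.mk.injEq]
        refine ⟨?_, by simp⟩
        conv_lhs => rw [← hS]
        rw [List.reverse_append, ← List.append_assoc]
        simp
    · by_cases h3 : w = "-"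
      · subst h3
        by_cases h : L = []
        · simp [h1, h2, h]
        · have hpos : 0 < L.length := List.length_pos_of_ne_nil h
          simp only [String.reduceEq, reduceIte, if_neg h, if_pos hpos, Prod.mk.injEq]
          refine ⟨?_, by simp [List.length_dropLast]⟩
          rw [List.eraseIdx_append_of_lt_length (by omega)]
          congr 1
          exact (List.dropLast_eq_eraseIdx (by omega)).symm
      · simp only [if_neg h1, if_neg h2, if_neg h3, Prod.mk.injEq]
        refine ⟨?_, by simp⟩
        rw [List.take_left, List.drop_left, List.append_assoc]
        simp

theorem loopAB (a : List String) : ∀ L S,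
    a.foldl stepB (L ++ S.reverse, L.length)
      = ((a.foldl stepA (L, S)).1 ++ (a.foldl stepA (L, S)).2.reverse,
         (a.foldl stepA (L, S)).1.length) := by
  induction a with
  | nil => intro L S; simp
  | cons w a ih =>
      intro L S
      simp only [List.foldl_cons, stepAB L S w]
      exact ih _ _

-- ===== VERDICT (by name: the statement is the Claim_ definition above) =====
theorem findPassword_spec : Claim_equal_findPassword := by
  intro a _
  unfold Spec_findPassword findPassword findPassword_alt
  have h := loopAB a [] []
  simp only [List.nil_append, List.reverse_nil, List.length_nil] at h
  rw [h, flushA_eq]
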